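-- pv_equiv track=rewrite | github.com/JoshuaYang-Taiwan/CodeFights | Arcade/The Core/31_increaseNumberRoundness.py | increaseNumberRoundness
-- ===== SOURCE A (Python) =====
-- def increaseNumberRoundness(n):
--     isZero = True
--     for i in str(n)[::-1]:
--         if i != "0" and isZero:
--             isZero = False
--         elif i == "0" and not isZero:
--             return True
--     return False
-- ===== SOURCE B (Python) =====
-- def increaseNumberRoundness(n):
--     s = str(n).rstrip('0')
--     return '0' in s
-- ===== Notes on version B (the rewrite author's own statement) =====
-- stated objective: simpler
-- what changed: Replaces the reversed-iteration state machine with a boolean flag by stripping trailing zero characters (rstrip) and then a single membership test for '0'.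
import Mathlib
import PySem

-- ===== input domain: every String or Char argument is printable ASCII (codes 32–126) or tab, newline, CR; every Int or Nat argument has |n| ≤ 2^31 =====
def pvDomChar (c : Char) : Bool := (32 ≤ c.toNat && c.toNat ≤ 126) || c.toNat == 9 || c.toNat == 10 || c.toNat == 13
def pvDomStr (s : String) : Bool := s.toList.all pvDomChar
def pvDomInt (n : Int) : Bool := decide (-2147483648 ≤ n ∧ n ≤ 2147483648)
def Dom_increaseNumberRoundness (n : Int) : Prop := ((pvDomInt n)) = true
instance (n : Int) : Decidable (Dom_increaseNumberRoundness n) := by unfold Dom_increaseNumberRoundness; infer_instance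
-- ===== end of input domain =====

-- B replaces A's reversed-iteration flag machine by rstrip('0') then a '0'-membership test (objective: simpler).
-- ===== PORT A =====
-- the 'for i in str(n)[::-1]' loop with flag isZero and early 'return True'
def incA_loop : List Char → Bool → Bool
  | [], _ => false
  | c :: rest, isZero =>
    if c != '0' && isZero then incA_loop rest false
    else if c == '0' && !isZero then true
    else incA_loop rest isZero

def increaseNumberRoundness (n : Int) : Bool :=
  incA_loop (PySem.Int.toChars n).reverse true

-- ===== PORT B =====
-- str(n).rstrip('0'): exact as dropping the trailing '0' run (Python rstrip with chars='0');
-- '0' in s for a single char is exactly element membership.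
def increaseNumberRoundness_alt (n : Int) : Bool :=
  let s := ((PySem.Int.toChars n).reverse.dropWhile (fun c => c == '0')).reverse
  s.contains '0'

-- ===== PRECONDITION & SPEC =====
def Spec_increaseNumberRoundness (n : Int) (out : Bool) : Prop := out = increaseNumberRoundness_alt n
instance (n : Int) (out : Bool) : Decidable (Spec_increaseNumberRoundness n out) := by unfold Spec_increaseNumberRoundness; infer_instance

-- ===== CLAIM (what is proved, stated in full; the proofs are below) =====
def Claim_equal_increaseNumberRoundness : Prop := ∀ (n : Int), Dom_increaseNumberRoundness n → Spec_increaseNumberRoundness n (increaseNumberRoundness n)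

-- ===== LEMMAS AND PROOFS =====

lemma loop_false (l : List Char) : incA_loop l false = l.contains '0' := by
  induction l with
  | nil => simp [incA_loop]
  | cons c rest ih =>
    by_cases h : c = '0'
    · simp [incA_loop, h, ih]
    · simp [incA_loop, h, ih, show (decide ('0' = c)) = false by simp [Ne.symm h]]

lemma loop_true (l : List Char) :
    incA_loop l true = (l.dropWhile (fun c => c == '0')).contains '0' := by
  induction l with
  | nil => simp [incA_loop]
  | cons c rest ih =>
    by_cases h : c = '0'
    · simp [incA_loop, h, ih, List.dropWhile]
    · simp [incA_loop, h, List.dropWhile, loop_false,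
            show (c == '0') = false by simp [h]]
      intro h'; exact absurd h'.symm h

-- ===== VERDICT (by name: the statement is the Claim_ definition above) =====
theorem increaseNumberRoundness_spec : Claim_equal_increaseNumberRoundness := by
  intro n _
  unfold Spec_increaseNumberRoundness increaseNumberRoundness increaseNumberRoundness_alt
  simp [loop_true]
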